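-- pv_equiv track=rewrite | github.com/mikewarot/Bitgrid_python | bitgrid/cli/measure_fa1_timing.py | earliest_stable_step
-- ===== SOURCE A (Python) =====
-- from typing import Tuple, Optional
--
-- def earliest_stable_step(trace: list[list[int]], expected: int) -> Tuple[Optional[int], Optional[int]]:
--     """Given an edge trace (list of vectors per step), find the earliest step and position
--     where the output equals `expected` and remains equal for the rest of the steps.
--     Returns (step_index, position). If none found, returns (None, None).
--     """
--     if not trace:
--         return None, None
--     steps = len(trace)
--     width = len(trace[0]) if steps > 0 else 0
--     for pos in range(width):
--         for s in range(steps):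
--             ok = True
--             for t in range(s, steps):
--                 if trace[t][pos] != expected:
--                     ok = False
--                     break
--             if ok:
--                 return s, pos
--     return None, None
-- ===== SOURCE B (Python) =====
-- def earliest_stable_step(trace, expected):
--     """B: for each position extract its column, count the length of the trailing
--     run of `expected` values; a stable suffix exists iff that run is nonempty,
--     and the earliest stable step is steps - run. O(width*steps)."""
--     if not trace:
--         return None, None
--     for pos in range(len(trace[0])):
--         col = [row[pos] for row in trace]
--         run = 0
--         for v in reversed(col):
--             if v != expected:
--                 break
--             run += 1
--         if run > 0:
--             return len(col) - run, pos
--     return None, None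
-- ===== Notes on version B (the rewrite author's own statement) =====
-- stated objective: faster
-- what changed: Instead of testing every suffix per position (triple loop), B extracts each column once and counts its trailing run of expected values in a single backward pass; the earliest stable step is steps - run.
-- outside the precondition, e.g. on earliest_stable_step([[1, 0], [1]], 1): A returns (0, 0), B returns (0, 0)
import Mathlib
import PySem

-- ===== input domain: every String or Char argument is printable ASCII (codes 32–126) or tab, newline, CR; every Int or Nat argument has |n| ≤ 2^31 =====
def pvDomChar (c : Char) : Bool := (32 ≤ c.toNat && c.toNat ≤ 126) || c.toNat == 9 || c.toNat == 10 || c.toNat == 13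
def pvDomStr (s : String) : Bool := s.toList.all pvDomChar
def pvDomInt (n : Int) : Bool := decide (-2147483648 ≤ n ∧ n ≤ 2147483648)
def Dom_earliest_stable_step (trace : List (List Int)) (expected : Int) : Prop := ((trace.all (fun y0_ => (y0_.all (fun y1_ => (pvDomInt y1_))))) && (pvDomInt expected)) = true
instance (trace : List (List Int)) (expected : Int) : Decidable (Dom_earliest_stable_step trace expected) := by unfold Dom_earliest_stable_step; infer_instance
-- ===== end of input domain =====

-- B replaces A's per-position scan of every suffix by extracting each column once
-- and counting its trailing run of `expected` values (objective: faster).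

-- ===== PORT A =====
-- inner loop `for t in range(s, steps): if trace[t][pos] != expected: ok = False; break`
def aSuffixOk (expected : Int) (pos : Nat) : List (List Int) → Bool
  | [] => true
  | r :: rest =>
    if PySem.List.pyGet? r (pos : Int) == some expected then aSuffixOk expected pos rest
    else false

-- middle loop `for s in range(steps): … if ok: return s, pos` (rows = trace.drop s)
def aFindS (expected : Int) (pos : Nat) : Nat → List (List Int) → Option Nat
  | _, [] => none
  | s, r :: rest =>
    if aSuffixOk expected pos (r :: rest) then some s
    else aFindS expected pos (s + 1) rest

-- outer loop `for pos in range(width)`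
def aPosLoop (trace : List (List Int)) (expected : Int) : Nat → Nat → Option Int × Option Int
  | 0, _ => (none, none)
  | rem + 1, pos =>
    match aFindS expected pos 0 trace with
    | some s => (some (s : Int), some (pos : Int))
    | none => aPosLoop trace expected rem (pos + 1)

def earliest_stable_step (trace : List (List Int)) (expected : Int) : Option Int × Option Int :=
  match trace with
  | [] => (none, none)
  | r0 :: _ => aPosLoop trace expected r0.length 0

-- ===== PORT B =====
-- `run = 0; for v in reversed(col): if v != expected: break; run += 1`
def bRun (expected : Int) : List (Option Int) → Nat
  | [] => 0
  | v :: rest => if v == some expected then bRun expected rest + 1 else 0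

-- `for pos in range(len(trace[0])): col = [row[pos] for row in trace]; …`
def bLoop (trace : List (List Int)) (expected : Int) : List Int → Option Int × Option Int
  | [] => (none, none)
  | pos :: poss =>
    let col := trace.map (fun row => PySem.List.pyGet? row pos)
    let run := bRun expected col.reverse
    if run > 0 then (some ((col.length : Int) - (run : Int)), some pos)
    else bLoop trace expected poss

def earliest_stable_step_alt (trace : List (List Int)) (expected : Int) : Option Int × Option Int :=
  match trace with
  | [] => (none, none)
  | r0 :: _ => bLoop trace expected (PySem.List.pyRange 0 (r0.length : Int) 1)

-- ===== PRECONDITION & SPEC =====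
-- Pre_ requires every row to be at least as long as the first (both programs only read
-- positions < len(trace[0])): with a shorter row Python A raises IndexError on most
-- inputs, though on some it happens to return (by finding a stable column) before
-- reaching the short row — those are excluded too.
def Pre_earliest_stable_step (trace : List (List Int)) (expected : Int) : Prop :=
  ∀ r ∈ trace, (trace.headD []).length ≤ r.length

instance (trace : List (List Int)) (expected : Int) : Decidable (Pre_earliest_stable_step trace expected) := by
  unfold Pre_earliest_stable_step; infer_instance

def pvWitness_earliest_stable_step : List (List Int) × Int := ([[0, 1], [1, 1]], 1)

def Spec_earliest_stable_step (trace : List (List Int)) (expected : Int) (out : Option Int × Option Int) : Prop := out = earliest_stable_step_alt trace expected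
instance (trace : List (List Int)) (expected : Int) (out : Option Int × Option Int) : Decidable (Spec_earliest_stable_step trace expected out) := by unfold Spec_earliest_stable_step; infer_instance

-- ===== CLAIM (what is proved, stated in full; the proofs are below) =====
def Claim_equal_earliest_stable_step : Prop := ∀ (trace : List (List Int)) (expected : Int), Dom_earliest_stable_step trace expected → Pre_earliest_stable_step trace expected → Spec_earliest_stable_step trace expected (earliest_stable_step trace expected)

-- ===== LEMMAS AND PROOFS =====

-- row test shared by the analysis of both ports
def pvP (e : Int) (pos : Nat) (r : List Int) : Bool :=
  PySem.List.pyGet? r (pos : Int) == some e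

theorem aSuffixOk_eq_all (e : Int) (pos : Nat) (rows : List (List Int)) :
    aSuffixOk e pos rows = rows.all (pvP e pos) := by
  induction rows with
  | nil => rfl
  | cons r rest ih =>
    simp only [aSuffixOk, List.all_cons, pvP]
    cases h : (PySem.List.pyGet? r (pos : Int) == some e) with
    | true => simp only [if_true, ih, Bool.true_and]
    | false => simp only [Bool.false_eq_true, if_false, Bool.false_and]

theorem takeWhile_of_all {α : Type} (p : α → Bool) (l : List α) (h : l.all p = true) :
    l.takeWhile p = l := by
  induction l with
  | nil => rfl
  | cons x xs ih =>
    simp only [List.all_cons, Bool.and_eq_true] at h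
    simp only [List.takeWhile, h.1, ih h.2]

theorem length_takeWhile_le' {α : Type} (p : α → Bool) (l : List α) :
    (l.takeWhile p).length ≤ l.length := by
  induction l with
  | nil => simp
  | cons x xs ih =>
    simp only [List.takeWhile]
    cases p x <;> simp only [List.length_cons, List.length_nil] <;> omega

theorem length_takeWhile_lt_of_not_all {α : Type} (p : α → Bool) (l : List α)
    (h : ¬ l.all p = true) : (l.takeWhile p).length < l.length := by
  induction l with
  | nil => exact absurd rfl h
  | cons x xs ih =>
    simp only [List.takeWhile]
    cases hx : p x with
    | true =>
      have : ¬ xs.all p = true := fun hxs => h (by simp [List.all_cons, hx, hxs])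
      simp only [List.length_cons]
      exact Nat.succ_lt_succ (ih this)
    | false => simp

theorem takeWhile_append_single {α : Type} (p : α → Bool) (l : List α) (x : α) :
    (l ++ [x]).takeWhile p =
      if l.all p then l ++ [x].takeWhile p else l.takeWhile p := by
  induction l with
  | nil => simp
  | cons y ys ih =>
    cases h : p y with
    | true =>
      simp only [List.cons_append, List.takeWhile, h, List.all_cons, ih, Bool.true_and]
      by_cases h2 : ys.all p = true <;> simp [h2]
    | false => simp [List.takeWhile, h]

theorem all_getLastD {α : Type} (p : α → Bool) (x : α) (xs : List α) (d : α)
    (h : (x :: xs).all p = true) : p ((x :: xs).getLastD d) = true := by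
  induction xs generalizing x d with
  | nil => simpa using h
  | cons y ys ih =>
    simp only [List.all_cons, Bool.and_eq_true] at h
    rw [List.getLastD_cons]
    exact ih y x (by simp [h.2])

theorem all_of_dropLast_getLastD {α : Type} (p : α → Bool) (x : α) (xs : List α) (d : α)
    (h1 : (x :: xs).dropLast.all p = true) (h2 : p ((x :: xs).getLastD d) = true) :
    (x :: xs).all p = true := by
  induction xs generalizing x d with
  | nil => simpa using h2
  | cons y ys ih =>
    simp only [List.dropLast_cons₂, List.all_cons, Bool.and_eq_true] at h1 ⊢
    rw [List.getLastD_cons] at h2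
    have hrec := ih y x (by simpa using h1.2) h2
    simp only [List.all_cons, Bool.and_eq_true] at hrec
    exact ⟨h1.1, hrec⟩

theorem getLastD_indep {α : Type} : ∀ (xs : List α) (x d d' : α),
    (x :: xs).getLastD d = (x :: xs).getLastD d'
  | [], _, _, _ => by simp only [List.getLastD_cons]
  | _ :: _, _, _, _ => by simp only [List.getLastD_cons]

-- characterization of A's middle loop, per position
theorem aFindS_char (e : Int) (pos : Nat) :
    ∀ (rows : List (List Int)) (s : Nat),
      aFindS e pos s rows =
        if rows ≠ [] ∧ pvP e pos (rows.getLastD []) = true then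
          some (s + (rows.length - 1 - ((rows.dropLast.reverse.takeWhile (pvP e pos)).length)))
        else none := by
  intro rows
  induction rows with
  | nil => intro s; simp [aFindS]
  | cons r rest ih =>
    intro s
    simp only [aFindS, aSuffixOk_eq_all]
    by_cases hall : ((r :: rest).all (pvP e pos)) = true
    · rw [if_pos hall]
      have hlast : pvP e pos ((r :: rest).getLastD []) = true :=
        all_getLastD _ _ _ _ hall
      have hdl : ((r :: rest).dropLast).all (pvP e pos) = true := by
        rw [List.all_eq_true] at hall ⊢
        intro x hx; exact hall x (List.dropLast_subset _ hx)
      have htw : ((r :: rest).dropLast.reverse.takeWhile (pvP e pos)) =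
          (r :: rest).dropLast.reverse :=
        takeWhile_of_all _ _ (by simpa [List.all_reverse] using hdl)
      rw [if_pos ⟨by simp, hlast⟩, htw]
      simp [List.length_dropLast]
    · rw [if_neg hall, ih]
      cases rest with
      | nil =>
        simp only [List.all_cons, List.all_nil, Bool.and_true] at hall
        simp [hall]
      | cons r2 rest2 =>
        have hne2 : (r2 :: rest2 : List (List Int)) ≠ [] := by simp
        have hlastcons : ((r :: r2 :: rest2).getLastD ([] : List Int))
            = ((r2 :: rest2).getLastD ([] : List Int)) := by
          rw [List.getLastD_cons]
          exact getLastD_indep rest2 r2 r []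
        by_cases hlast : pvP e pos ((r2 :: rest2).getLastD []) = true
        · rw [if_pos ⟨hne2, hlast⟩, if_pos ⟨by simp, by rw [hlastcons]; exact hlast⟩]
          have hrev : (r :: r2 :: rest2).dropLast.reverse
              = (r2 :: rest2).dropLast.reverse ++ [r] := by
            rw [List.dropLast_cons₂]; simp
          set l := (r2 :: rest2).dropLast.reverse with hl
          have htw := takeWhile_append_single (pvP e pos) l r
          have hlen : l.length = (r2 :: rest2).length - 1 := by
            simp [hl, List.length_dropLast]
          have htwle : (l.takeWhile (pvP e pos)).length ≤ l.length :=
            length_takeWhile_le' _ _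
          rw [hrev, htw]
          by_cases halll : l.all (pvP e pos) = true
          · -- everything before r matches; r itself cannot match
            have hrf : pvP e pos r = false := by
              cases hc : pvP e pos r with
              | false => rfl
              | true =>
                exfalso
                have hall2 : (r2 :: rest2).all (pvP e pos) = true :=
                  all_of_dropLast_getLastD _ _ _ ([] : List Int)
                    (by simpa [hl, List.all_reverse] using halll) hlast
                exact hall (by simp [List.all_cons, hc, hall2])
            rw [if_pos halll]
            have h1 : ([r].takeWhile (pvP e pos)) = [] := by
              simp [List.takeWhile, hrf]
            rw [h1, takeWhile_of_all _ _ halll]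
            simp only [List.length_append, List.length_nil, List.length_cons,
              Option.some.injEq]
            simp only [List.length_cons] at hlen
            omega
          · rw [if_neg halll]
            have hlt : (l.takeWhile (pvP e pos)).length < l.length :=
              length_takeWhile_lt_of_not_all _ _ halll
            simp only [List.length_cons, Option.some.injEq]
            simp only [List.length_cons] at hlen
            omega
        · rw [if_neg (fun hc => hlast hc.2),
              if_neg (fun hc => hlast (hlastcons ▸ hc.2))]

-- B's run counter is the length of the leading run of matches
theorem bRun_eq_takeWhile (e : Int) (l : List (Option Int)) :
    bRun e l = (l.takeWhile (fun v => v == some e)).length := by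
  induction l with
  | nil => rfl
  | cons v rest ih =>
    simp only [bRun, List.takeWhile]
    cases h : (v == some e) with
    | true => simp [ih]
    | false => simp

-- the trailing run of the extracted column, in terms of pvP on the rows
theorem bRun_col_char (e : Int) (pos : Nat) (x : List Int) (xs : List (List Int)) :
    bRun e (((x :: xs).map (fun row => PySem.List.pyGet? row (pos : Int))).reverse) =
      if pvP e pos ((x :: xs).getLastD []) = true then
        ((x :: xs).dropLast.reverse.takeWhile (pvP e pos)).length + 1
      else 0 := by
  have hne : (x :: xs : List (List Int)) ≠ [] := by simp
  have hsplit : (x :: xs).reverse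
      = (x :: xs).getLast hne :: (x :: xs).dropLast.reverse := by
    conv_lhs => rw [← List.dropLast_append_getLast hne]
    simp
  have hgl : (x :: xs).getLast hne = (x :: xs).getLastD [] := by
    simp [List.getLastD_eq_getLast?, List.getLast?_eq_some_getLast hne]
  rw [bRun_eq_takeWhile, ← List.map_reverse, hsplit, hgl, List.map_cons, List.takeWhile_cons]
  have hp : (PySem.List.pyGet? ((x :: xs).getLastD []) (pos : Int) == some e)
      = pvP e pos ((x :: xs).getLastD []) := rfl
  rw [hp]
  cases h : pvP e pos ((x :: xs).getLastD []) with
  | true =>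
    rw [if_pos rfl, List.length_cons, List.takeWhile_map, List.length_map]
    rfl
  | false =>
    rw [if_neg Bool.false_ne_true, List.length_nil, if_neg Bool.false_ne_true]

-- the two position loops agree
theorem posLoop_eq (x : List Int) (xs : List (List Int)) (e : Int) :
    ∀ (rem pos : Nat),
      aPosLoop (x :: xs) e rem pos
        = bLoop (x :: xs) e ((List.range rem).map (fun k : Nat => (pos : Int) + (k : Int))) := by
  intro rem
  induction rem with
  | zero => intro pos; rfl
  | succ n ih =>
    intro pos
    have hrange : (List.range (n + 1)).map (fun k : Nat => (pos : Int) + (k : Int))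
        = (pos : Int) :: (List.range n).map (fun k : Nat => ((pos + 1 : Nat) : Int) + (k : Int)) := by
      rw [List.range_succ_eq_map, List.map_cons, List.map_map]
      refine congrArg₂ List.cons (by simp) ?_
      apply List.map_congr_left
      intro k _
      simp only [Function.comp_apply]
      push_cast
      ring
    rw [hrange]
    simp only [aPosLoop, bLoop, aFindS_char, bRun_col_char, List.length_map]
    by_cases h : pvP e pos ((x :: xs).getLastD []) = true
    · rw [if_pos ⟨by simp, h⟩, if_pos h]
      have htwle : (((x :: xs).dropLast.reverse.takeWhile (pvP e pos)).length)
          ≤ (x :: xs).dropLast.reverse.length := length_takeWhile_le' _ _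
      simp only [List.length_reverse, List.length_dropLast, List.length_cons] at htwle
      simp only [if_pos (by omega : ((x :: xs).dropLast.reverse.takeWhile (pvP e pos)).length + 1 > 0)]
      simp only [Prod.mk.injEq, Option.some.injEq, List.length_cons, and_true]
      omega
    · rw [if_neg (fun hc => h hc.2), if_neg h]
      simp only [if_neg (by omega : ¬ (0 : Nat) > 0)]
      exact ih (pos + 1)

theorem ports_agree (trace : List (List Int)) (e : Int) :
    earliest_stable_step trace e = earliest_stable_step_alt trace e := by
  cases trace with
  | nil => rfl
  | cons r0 rest =>
    simp only [earliest_stable_step, earliest_stable_step_alt]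
    rw [PySem.List.pyRange_one]
    have : ((r0.length : Int) - 0).toNat = r0.length := by omega
    rw [this]
    rw [posLoop_eq r0 rest e r0.length 0]
    congr 1

-- ===== VERDICT (by name: the statement is the Claim_ definition above) =====
theorem earliest_stable_step_spec : Claim_equal_earliest_stable_step := by
  intro trace expected _ _
  unfold Spec_earliest_stable_step
  exact ports_agree trace expected
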